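-- pv_equiv track=rewrite | github.com/Aurora0601/Python-Cypto-tools | 测试.py | simulate_encoding
-- ===== SOURCE A (Python) =====
-- def simulate_encoding(plain_text):
--     # 将明文转换为二进制数据
--     binary_data = plain_text.encode('utf-8')
--
--     # 初始化编码后的字符串
--     encoded_data = ''
--
--     # 用于存储当前行的编码字符，以便在达到固定长度时换行
--     current_line = ''
--
--     # 遍历二进制数据，每次处理3个字节（或数据末尾的剩余字节）
--     for i in range(0, len(binary_data), 3):
--         # 获取当前3字节（或更少）的数据块
--         chunk = binary_data[i:i + 3]
--
--         # 模拟编码过程：将每个字节转换为两个字符的字符串（这里用十六进制表示作为示例）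
--         # 注意：这不是真实的编码，只是用十六进制作为占位符来模拟编码后的字符串长度
--         encoded_chunk = ''.join(f'{byte:02x}' for byte in chunk).ljust(6, ' ')  # 确保每个块占6个字符
--
--         # 将编码后的块添加到当前行
--         current_line += encoded_chunk
--
--         # 如果当前行长度达到或超过45个字符，则将其添加到编码后的字符串中，并重置当前行
--         if len(current_line) >= 45:
--             encoded_data += current_line[:45] + '\n'  # 只取前45个字符并换行
--             current_line = current_line[45:]  # 移除已添加到encoded_data的部分
--
--     # 处理剩余的行（如果最后一行不足45个字符）
--     if current_line:
--         encoded_data += current_line.ljust(45, ' ') + '\n'  # 用空格填充到45个字符并换行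
--         # 如果不希望最后一行有多余的空格，可以移除它们：
--         # encoded_data = encoded_data.rstrip() + '\n'  # 但这样会移除所有行尾的空格和换行符，需要额外处理
--         # 或者更简单地，只添加非空部分而不填充空格：
--         # if current_line.strip():  # 如果当前行不是空字符串（去除首尾空格后）
--         #     encoded_data += current_line + '\n'  # 直接添加，不填充
--     else:
--         # 如果整个输入为空，则encoded_data将保持为空字符串，不需要额外的换行符
--         pass
--
--     # 由于我们可能在最后一行添加了一个额外的换行符，我们需要去除它（如果输入不为空）
--     # 但由于上面的逻辑已经确保了只有在非空输入时才会添加换行符，且最后一行可能已经被处理，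
--     # 所以这里实际上不需要再次去除换行符。但如果我们想要确保没有多余的空行，可以这样做：
--     # if encoded_data and encoded_data.endswith('\n'):
--     #     encoded_data = encoded_data[:-1]
--     # 然而，由于我们在处理每一行时都确保了完整的换行符，且最后一行是通过不同的逻辑处理的，
--     # 所以上面的检查可能是多余的。在这个特定的例子中，我们可以省略它。
--
--     # 返回一个模拟编码后的字符串
--     return encoded_data.rstrip()  # 去除字符串末尾的所有空格和换行符（如果有的话）
-- ===== SOURCE B (Python) =====
-- def simulate_encoding(plain_text):
--     h = plain_text.encode('utf-8').hex()
--     return '\n'.join(h[i:i + 45] for i in range(0, len(h), 45)).rstrip()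
-- ===== Notes on version B (the rewrite author's own statement) =====
-- stated objective: simpler
-- what changed: B builds the complete hex string once with bytes.hex() and re-wraps it into fixed 45-char windows joined by newlines, replacing A's streaming loop over 3-byte chunks with per-chunk ljust(6) padding, a carry line buffer and a final ljust(45) flush; the padding A inserts is all trailing whitespace that its final rstrip() removes, so the results coincide.
import Mathlib
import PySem

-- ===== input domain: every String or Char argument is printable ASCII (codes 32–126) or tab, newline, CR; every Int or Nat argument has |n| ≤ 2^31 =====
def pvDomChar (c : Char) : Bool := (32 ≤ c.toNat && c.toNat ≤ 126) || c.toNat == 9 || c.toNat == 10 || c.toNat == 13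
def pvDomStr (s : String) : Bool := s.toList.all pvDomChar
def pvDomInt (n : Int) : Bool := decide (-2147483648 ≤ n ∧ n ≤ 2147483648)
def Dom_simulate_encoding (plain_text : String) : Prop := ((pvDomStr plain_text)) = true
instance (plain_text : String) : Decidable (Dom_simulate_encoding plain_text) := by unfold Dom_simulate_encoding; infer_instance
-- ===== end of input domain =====

-- B computes the full hex string once (bytes.hex()) and re-wraps it into 45-char windows (simpler
-- two-pass decomposition, measured faster by a constant factor) instead of A's streaming
-- 3-byte-chunk loop with per-chunk padding and a carry line buffer.

-- shared with both ports: f'{b:02x}' / one byte of bytes.hex() (exact for byte values)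
def pvHexDigit (n : Nat) : Char := if n < 10 then Char.ofNat (48 + n) else Char.ofNat (87 + n)
def pvHexByte (b : Nat) : List Char := [pvHexDigit (b / 16), pvHexDigit (b % 16)]

-- s.ljust(w, ' ')
def pvLjust (cs : List Char) (w : Nat) : List Char := cs ++ List.replicate (w - cs.length) ' '

-- ===== PORT A =====
def simulate_encoding (plain_text : String) : String :=
  -- encode('utf-8'): exact on the ASCII domain (one byte per char)
  let binary_data : List Nat := plain_text.toList.map Char.toNat
  let st := (PySem.List.pyRange 0 binary_data.length 3).foldl
    (fun (st : List Char × List Char) i =>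
      let chunk := PySem.List.slice binary_data (some i) (some (i + 3))
      let encoded_chunk := pvLjust (PySem.Chars.join [] (chunk.map pvHexByte)) 6
      let current_line := st.2 ++ encoded_chunk
      if 45 ≤ current_line.length then
        (st.1 ++ PySem.List.slice current_line none (some 45) ++ ['\n'],
         PySem.List.slice current_line (some 45) none)
      else (st.1, current_line))
    ([], [])
  let encoded_data := if st.2 ≠ [] then st.1 ++ pvLjust st.2 45 ++ ['\n'] else st.1
  String.ofList (PySem.Chars.rstrip encoded_data)

-- ===== PORT B =====
def simulate_encoding_alt (plain_text : String) : String :=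
  -- h = plain_text.encode('utf-8').hex()
  let h : List Char := (plain_text.toList.map Char.toNat).flatMap pvHexByte
  -- '\n'.join(h[i:i+45] for i in range(0, len(h), 45)).rstrip()
  String.ofList (PySem.Chars.rstrip (PySem.Chars.join ['\n']
    ((PySem.List.pyRange 0 h.length 45).map
      (fun i => PySem.List.slice h (some i) (some (i + 45))))))

-- ===== PRECONDITION & SPEC =====
def Spec_simulate_encoding (plain_text : String) (out : String) : Prop := out = simulate_encoding_alt plain_text
instance (plain_text : String) (out : String) : Decidable (Spec_simulate_encoding plain_text out) := by unfold Spec_simulate_encoding; infer_instance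

-- ===== CLAIM (what is proved, stated in full; the proofs are below) =====
def Claim_equal_simulate_encoding : Prop := ∀ (plain_text : String), Dom_simulate_encoding plain_text → Spec_simulate_encoding plain_text (simulate_encoding plain_text)

-- ===== LEMMAS AND PROOFS =====

def pvEnc (c : List Nat) : List Char := pvLjust (PySem.Chars.join [] (c.map pvHexByte)) 6
def pvStep (st : List Char × List Char) (c : List Nat) : List Char × List Char :=
  let current_line := st.2 ++ pvEnc c
  if 45 ≤ current_line.length then
    (st.1 ++ PySem.List.slice current_line none (some 45) ++ ['\n'],
     PySem.List.slice current_line (some 45) none)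
  else (st.1, current_line)
def pvFin (st : List Char × List Char) : List Char :=
  if st.2 ≠ [] then st.1 ++ pvLjust st.2 45 ++ ['\n'] else st.1
def pvWrapA (s : List Char) : List Char :=
  if s = [] then [] else
  if s.length < 45 then pvLjust s 45 ++ ['\n']
  else s.take 45 ++ '\n' :: pvWrapA (s.drop 45)
termination_by s.length
decreasing_by cases s with | nil => simp_all | cons a t => simp

def pvW (h : List Char) : List Char :=
  if h = [] then [] else
  if h.length ≤ 45 then h
  else h.take 45 ++ '\n' :: pvW (h.drop 45)
termination_by h.length
decreasing_by cases h with | nil => simp_all | cons a t => simp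
def pvChunks3 (bs : List Nat) : List (List Nat) :=
  if bs = [] then [] else bs.take 3 :: pvChunks3 (bs.drop 3)
termination_by bs.length
decreasing_by simp [List.length_pos_iff]; assumption
def pvPad (n : Nat) : Nat := (3 - n % 3) % 3 * 2

lemma pvHex_noWS (bs : List Nat) (hb : ∀ b ∈ bs, b ≤ 126) :
    ∀ c ∈ bs.flatMap pvHexByte, PySem.Chars.isspace c = false := by
  intro c hc
  rw [List.mem_flatMap] at hc
  obtain ⟨b, hbmem, hcmem⟩ := hc
  have h126 := hb b hbmem
  have key : ∀ n, n ≤ 15 → PySem.Chars.isspace (pvHexDigit n) = false := by decide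
  simp [pvHexByte] at hcmem
  rcases hcmem with h | h <;> subst h <;> apply key <;> omega



lemma rstrip_append_ws (a b : List Char) (hb : ∀ c ∈ b, PySem.Chars.isspace c = true) :
    PySem.Chars.rstrip (a ++ b) = PySem.Chars.rstrip a := by
  have hnil : List.dropWhile PySem.Chars.isspace b.reverse = [] := by
    rw [List.dropWhile_eq_nil_iff]
    intro x hx
    exact hb x (by simpa using hx)
  simp [PySem.Chars.rstrip, List.reverse_append, List.dropWhile_append, hnil]

lemma rstrip_append_of_ne (a b : List Char) (hb : PySem.Chars.rstrip b ≠ []) :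
    PySem.Chars.rstrip (a ++ b) = a ++ PySem.Chars.rstrip b := by
  simp only [PySem.Chars.rstrip] at *
  rw [List.reverse_append, List.dropWhile_append]
  have : (List.dropWhile PySem.Chars.isspace b.reverse).isEmpty = false := by
    cases h : List.dropWhile PySem.Chars.isspace b.reverse with
    | nil => exfalso; apply hb; simp [h]
    | cons x t => simp
  rw [this]
  simp

lemma rstrip_noWS (h : List Char) (hh : ∀ c ∈ h, PySem.Chars.isspace c = false) :
    PySem.Chars.rstrip h = h := by
  simp only [PySem.Chars.rstrip]
  cases hr : h.reverse with
  | nil => simp [List.reverse_eq_nil_iff.mp hr]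
  | cons x t =>
    have hx : x ∈ h := List.mem_reverse.mp (by rw [hr]; exact List.mem_cons_self)
    rw [List.dropWhile_cons_of_neg (by simp [hh x hx]), ← hr, List.reverse_reverse]

lemma pyRange3_cons (n : Nat) (hn : 0 < n) :
    PySem.List.pyRange 0 (n : Int) 3 = 0 :: (PySem.List.pyRange 0 ((n - 3 : Nat) : Int) 3).map (· + 3) := by
  rw [PySem.List.pyRange_of_pos 0 (n:Int) (by norm_num), PySem.List.pyRange_of_pos 0 ((n-3:Nat):Int) (by norm_num)]
  have h1 : (if (0:Int) < n then (((n:Int) - 0 + 3 - 1)/3).toNat else 0) = (n+2)/3 := by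
    rw [if_pos (by exact_mod_cast hn)]; omega
  have h2 : (if (0:Int) < ((n-3:Nat):Int) then ((((n-3:Nat):Int) - 0 + 3 - 1)/3).toNat else 0) = (n-3+2)/3 := by
    split <;> omega
  have h3 : (n+2)/3 = (n-3+2)/3 + 1 := by omega
  rw [h1, h2, h3, List.range_succ_eq_map]
  simp only [List.map_cons, List.map_map]
  refine congrArg₂ List.cons (by norm_num) ?_
  apply List.map_congr_left
  intro k _
  simp only [Function.comp_apply, Nat.succ_eq_add_one]
  push_cast
  ring

lemma pyRange45_cons (n : Nat) (hn : 0 < n) :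
    PySem.List.pyRange 0 (n : Int) 45 = 0 :: (PySem.List.pyRange 0 ((n - 45 : Nat) : Int) 45).map (· + 45) := by
  rw [PySem.List.pyRange_of_pos 0 (n:Int) (by norm_num), PySem.List.pyRange_of_pos 0 ((n-45:Nat):Int) (by norm_num)]
  have h1 : (if (0:Int) < n then (((n:Int) - 0 + 45 - 1)/45).toNat else 0) = (n+44)/45 := by
    rw [if_pos (by exact_mod_cast hn)]; omega
  have h2 : (if (0:Int) < ((n-45:Nat):Int) then ((((n-45:Nat):Int) - 0 + 45 - 1)/45).toNat else 0) = (n-45+44)/45 := by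
    split <;> omega
  have h3 : (n+44)/45 = (n-45+44)/45 + 1 := by omega
  rw [h1, h2, h3, List.range_succ_eq_map]
  simp only [List.map_cons, List.map_map]
  refine congrArg₂ List.cons (by norm_num) ?_
  apply List.map_congr_left
  intro k _
  simp only [Function.comp_apply, Nat.succ_eq_add_one]
  push_cast
  ring

lemma fold_idx_eq_chunks (g : (List Char × List Char) → List Nat → (List Char × List Char)) :
    ∀ (bs : List Nat) (st : List Char × List Char),
      (PySem.List.pyRange 0 (bs.length : Int) 3).foldl
        (fun st i => g st (PySem.List.slice bs (some i) (some (i + 3)))) st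
      = (pvChunks3 bs).foldl g st := by
  intro bs
  induction bs using pvChunks3.induct with
  | case1 => intro st; simp [pvChunks3, PySem.List.pyRange]
  | case2 bs hne ih =>
    intro st
    have hlen : 0 < bs.length := List.length_pos_iff.mpr hne
    rw [pyRange3_cons _ hlen, List.foldl_cons, List.foldl_map]
    have hhead : PySem.List.slice bs (some 0) (some (0 + 3)) = bs.take 3 := by
      norm_num [PySem.List.slice_zero_start]
      rw [PySem.List.slice_to bs (by norm_num)]
      simp
    rw [hhead]
    have hcong : List.foldl (fun st i => g st (PySem.List.slice bs (some (i + 3)) (some (i + 3 + 3))))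
        (g st (bs.take 3)) (PySem.List.pyRange 0 ((bs.length - 3 : Nat) : Int) 3)
        = List.foldl (fun st i => g st (PySem.List.slice (bs.drop 3) (some i) (some (i + 3))))
        (g st (bs.take 3)) (PySem.List.pyRange 0 ((bs.length - 3 : Nat) : Int) 3) := by
      apply PySem.List.foldl_congr_mem
      intro acc x hx
      have hx0 : 0 ≤ x := ((PySem.List.mem_pyRange_iff_of_pos (by norm_num) x).mp hx).1
      obtain ⟨k, rfl⟩ : ∃ k : Nat, x = (k : Int) := ⟨x.toNat, (Int.toNat_of_nonneg hx0).symm⟩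
      congr 1
      have hs : ∀ (xs : List Nat) (j : Nat),
          PySem.List.slice xs (some (j : Int)) (some ((j : Int) + 3)) = (xs.drop j).take 3 := by
        intro xs j
        simpa using PySem.List.slice_natCast_add xs j 3
      have e2 : ((k : Int) + 3 + 3) = (((k + 3 : Nat) : Int) + 3) := by push_cast; ring
      have e1 : ((k : Int) + 3) = ((k + 3 : Nat) : Int) := by push_cast; ring
      rw [e2, e1, hs bs (k + 3)]
      rw [← e1, hs (bs.drop 3) k, List.drop_drop, Nat.add_comm 3 k]
    rw [hcong]
    conv_rhs => rw [pvChunks3, if_neg hne]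
    rw [List.foldl_cons]
    simpa [List.length_drop] using ih (g st (bs.take 3))

lemma fold_chunks_wrapA :
    ∀ (chunks : List (List Nat)) (ed cl : List Char), cl.length < 45 →
      (∀ c ∈ chunks, (pvEnc c).length = 6) →
      pvFin (chunks.foldl pvStep (ed, cl)) = ed ++ pvWrapA (cl ++ chunks.flatMap pvEnc) := by
  intro chunks
  induction chunks with
  | nil =>
    intro ed cl hcl _
    by_cases hne : cl = []
    · simp [hne, pvFin, pvWrapA]
    · simp only [List.foldl_nil, List.flatMap_nil, List.append_nil, pvFin, if_pos hne]
      rw [pvWrapA, if_neg hne, if_pos hcl]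
      simp
  | cons c rest ih =>
    intro ed cl hcl hlen6
    have hc6 : (pvEnc c).length = 6 := hlen6 c (by simp)
    have hrest : ∀ x ∈ rest, (pvEnc x).length = 6 := fun x hx => hlen6 x (by simp [hx])
    rw [List.foldl_cons]
    have h45a : PySem.List.slice (cl ++ pvEnc c) none (some 45) = (cl ++ pvEnc c).take 45 := by
      rw [PySem.List.slice_to _ (by norm_num)]; simp
    have h45b : PySem.List.slice (cl ++ pvEnc c) (some 45) none = (cl ++ pvEnc c).drop 45 := by
      rw [PySem.List.slice_from _ (by norm_num)]; simp
    by_cases hge : 45 ≤ (cl ++ pvEnc c).length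
    · have hstep : pvStep (ed, cl) c
          = (ed ++ (cl ++ pvEnc c).take 45 ++ ['\n'], (cl ++ pvEnc c).drop 45) := by
        simp only [pvStep, h45a, h45b, if_pos hge]
      rw [hstep]
      have hdlen : ((cl ++ pvEnc c).drop 45).length < 45 := by
        simp [List.length_append, hc6] at hge ⊢; omega
      rw [ih _ _ hdlen hrest]
      rw [List.flatMap_cons, ← List.append_assoc cl (pvEnc c) _]
      have hne2 : cl ++ pvEnc c ++ rest.flatMap pvEnc ≠ [] := by
        intro h
        have := congrArg List.length h
        simp [List.length_append, hc6] at this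
      conv_rhs => rw [pvWrapA, if_neg hne2,
        if_neg (show ¬(cl ++ pvEnc c ++ List.flatMap pvEnc rest).length < 45 by
          have := hge; simp only [List.length_append] at this ⊢; omega)]
      rw [List.take_append_of_le_length hge, List.drop_append_of_le_length hge]
      simp
    · have hstep : pvStep (ed, cl) c = (ed, cl ++ pvEnc c) := by
        simp only [pvStep, if_neg hge]
      rw [hstep, ih _ _ (by omega) hrest, List.flatMap_cons, ← List.append_assoc]

lemma pvFlat_len (bs : List Nat) : (bs.flatMap pvHexByte).length = 2 * bs.length := by
  induction bs with
  | nil => simp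
  | cons b t ih => simp [List.flatMap_cons, ih, pvHexByte]; omega

lemma join_empty_sep (parts : List (List Char)) : PySem.Chars.join [] parts = parts.flatten := by
  induction parts with
  | nil => simp [PySem.Chars.join_nil]
  | cons p rest ih =>
    cases rest with
    | nil => simp [PySem.Chars.join_singleton]
    | cons q r => rw [PySem.Chars.join_cons_cons, List.flatten_cons, ih]; simp

lemma pvEnc_eq (c : List Nat) :
    pvEnc c = c.flatMap pvHexByte ++ List.replicate (6 - 2 * c.length) ' ' := by
  rw [pvEnc, pvLjust, join_empty_sep, ← List.flatMap_def, pvFlat_len]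

lemma pvEnc_len (c : List Nat) (h3 : c.length ≤ 3) : (pvEnc c).length = 6 := by
  rw [pvEnc_eq, List.length_append, pvFlat_len, List.length_replicate]
  omega

lemma chunks_enc_len (bs : List Nat) : ∀ c ∈ pvChunks3 bs, (pvEnc c).length = 6 := by
  induction bs using pvChunks3.induct with
  | case1 => simp [pvChunks3]
  | case2 bs hne ih =>
    rw [pvChunks3, if_neg hne]
    intro c hc
    rcases List.mem_cons.mp hc with h | h
    · subst h; exact pvEnc_len _ (by simp)
    · exact ih c h

lemma chunks_flat_enc (bs : List Nat) :
    (pvChunks3 bs).flatMap pvEnc = bs.flatMap pvHexByte ++ List.replicate (pvPad bs.length) ' ' := by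
  induction bs using pvChunks3.induct with
  | case1 => simp [pvChunks3, pvPad]
  | case2 bs hne ih =>
    rw [pvChunks3, if_neg hne, List.flatMap_cons, ih]
    have hlen : 0 < bs.length := List.length_pos_iff.mpr hne
    by_cases h3 : 3 ≤ bs.length
    · have htk : (bs.take 3).length = 3 := by simp; omega
      rw [pvEnc_eq, htk]
      have : (6 - 2 * 3) = 0 := by norm_num
      rw [this, List.replicate_zero, List.append_nil]
      have hsplit : bs.flatMap pvHexByte = (bs.take 3).flatMap pvHexByte ++ (bs.drop 3).flatMap pvHexByte := by
        conv_lhs => rw [← List.take_append_drop 3 bs]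
        rw [List.flatMap_append]
      rw [hsplit, List.append_assoc]
      have hpad : pvPad (bs.drop 3).length = pvPad bs.length := by
        simp only [pvPad, List.length_drop]; omega
      rw [hpad]
    · have htk : bs.take 3 = bs := List.take_of_length_le (by omega)
      have hdr : bs.drop 3 = [] := List.drop_eq_nil_of_le (by omega)
      rw [htk, hdr, pvEnc_eq]
      have h0 : pvPad ([] : List Nat).length = 0 := by simp [pvPad]
      rw [h0]
      simp only [List.flatMap_nil, List.replicate_zero, List.append_nil]
      have he : 6 - 2 * bs.length = pvPad bs.length := by simp only [pvPad]; omega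
      rw [he]

lemma wsAux (k : Nat) (hk : k < 45) :
    ∀ c ∈ pvWrapA (List.replicate k ' '), PySem.Chars.isspace c = true := by
  intro c hc
  rw [pvWrapA] at hc
  by_cases h0 : k = 0
  · simp [h0] at hc
  · rw [if_neg (by simp [h0]), if_pos (by simp; omega)] at hc
    rw [pvLjust] at hc
    rcases List.mem_append.mp hc with h | h
    · rcases List.mem_append.mp h with h2 | h2 <;>
        (rw [List.eq_of_mem_replicate h2]; decide)
    · rw [List.mem_singleton.mp h]; decide

lemma pvW_ne_nil (h : List Char) (hh : h ≠ []) : pvW h ≠ [] := by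
  rw [pvW, if_neg hh]
  split
  · exact hh
  · simp

lemma wrapA_eq_h_ws (h : List Char) (p : Nat) (hne : h ≠ []) (hle : h.length ≤ 45) (hp : p ≤ 4) :
    ∃ ws, pvWrapA (h ++ List.replicate p ' ') = h ++ ws ∧
      ∀ c ∈ ws, PySem.Chars.isspace c = true := by
  have hargne : h ++ List.replicate p ' ' ≠ [] := by simp [hne]
  by_cases hbig : 45 ≤ h.length + p
  · refine ⟨List.replicate (min (45 - h.length) p) ' ' ++
      '\n' :: pvWrapA (List.replicate (p - (45 - h.length)) ' '), ?_, ?_⟩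
    · rw [pvWrapA, if_neg hargne,
        if_neg (by simp only [List.length_append, List.length_replicate]; omega)]
      rw [List.take_append, List.take_of_length_le hle, List.take_replicate,
          List.drop_append, List.drop_eq_nil_of_le hle, List.drop_replicate]
      simp
    · intro c hc
      rcases List.mem_append.mp hc with h2 | h2
      · rw [List.eq_of_mem_replicate h2]; decide
      · rcases List.mem_cons.mp h2 with h3 | h3
        · rw [h3]; decide
        · exact wsAux _ (by omega) c h3
  · refine ⟨List.replicate p ' ' ++ List.replicate (45 - (h ++ List.replicate p ' ').length) ' ' ++ ['\n'], ?_, ?_⟩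
    · rw [pvWrapA, if_neg hargne,
        if_pos (by simp only [List.length_append, List.length_replicate]; omega)]
      simp [pvLjust]
    · intro c hc
      rcases List.mem_append.mp hc with h2 | h2
      · rcases List.mem_append.mp h2 with h3 | h3 <;>
          (rw [List.eq_of_mem_replicate h3]; decide)
      · rw [List.mem_singleton.mp h2]; decide

lemma rstrip_wrapA (h : List Char) :
    (∀ c ∈ h, PySem.Chars.isspace c = false) → ∀ p : Nat, p ≤ 4 → (h = [] → p = 0) →
    PySem.Chars.rstrip (pvWrapA (h ++ List.replicate p ' ')) = pvW h := by
  induction h using pvW.induct with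
  | case1 =>
    intro _ p _ hz
    rw [hz rfl]
    simp [pvWrapA, pvW, PySem.Chars.rstrip]
  | case2 h hne hle =>
    intro hh p hp _
    obtain ⟨ws, heq, hws⟩ := wrapA_eq_h_ws h p hne hle hp
    rw [heq, rstrip_append_ws _ _ hws, rstrip_noWS _ hh, pvW, if_neg hne, if_pos hle]
  | case3 h hne hgt ih =>
    intro hh p hp _
    have hdne : h.drop 45 ≠ [] := by
      intro hemp
      have := congrArg List.length hemp
      simp at this
      omega
    have hrec := ih (fun c hc => hh c (List.mem_of_mem_drop hc)) p hp (fun hemp => absurd hemp hdne)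
    rw [pvWrapA, if_neg (by simp [hne]),
        if_neg (by simp only [List.length_append, List.length_replicate]; omega)]
    rw [List.take_append_of_le_length (by omega), List.drop_append_of_le_length (by omega)]
    have hXne : PySem.Chars.rstrip (pvWrapA (h.drop 45 ++ List.replicate p ' ')) ≠ [] := by
      rw [hrec]; exact pvW_ne_nil _ hdne
    rw [← List.singleton_append, ← List.append_assoc, rstrip_append_of_ne _ _ hXne]
    rw [hrec]
    conv_rhs => rw [pvW, if_neg hne, if_neg hgt]
    simp

lemma join_windows_eq_pvW (h : List Char) :
    PySem.Chars.join ['\n'] ((PySem.List.pyRange 0 (h.length : Int) 45).map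
        (fun i => PySem.List.slice h (some i) (some (i + 45)))) = pvW h := by
  induction h using pvW.induct with
  | case1 => simp [PySem.List.pyRange, pvW, PySem.Chars.join_nil]
  | case2 h hne hle =>
    rw [pvW, if_neg hne, if_pos hle]
    have hlen : 0 < h.length := List.length_pos_iff.mpr hne
    rw [pyRange45_cons _ hlen]
    have hz : h.length - 45 = 0 := by omega
    rw [hz]
    have hemp : PySem.List.pyRange 0 ((0:Nat):Int) 45 = [] := by simp [PySem.List.pyRange]
    rw [hemp]
    simp only [List.map_nil, List.map_cons]
    rw [PySem.Chars.join_singleton]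
    norm_num [PySem.List.slice_zero_start]
    rw [PySem.List.slice_to h (by norm_num)]
    simp [List.take_of_length_le hle]
  | case3 h hne hgt ih =>
    have hlen : 0 < h.length := List.length_pos_iff.mpr hne
    rw [pvW, if_neg hne, if_neg hgt]
    rw [pyRange45_cons _ hlen, List.map_cons, List.map_map]
    have hhead : PySem.List.slice h (some 0) (some (0 + 45)) = h.take 45 := by
      norm_num [PySem.List.slice_zero_start]
      rw [PySem.List.slice_to h (by norm_num)]
      simp
    have hs : ∀ (xs : List Char) (j : Nat),
        PySem.List.slice xs (some (j : Int)) (some ((j : Int) + 45)) = (xs.drop j).take 45 := by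
      intro xs j
      simpa using PySem.List.slice_natCast_add xs j 45
    have htail : (PySem.List.pyRange 0 ((h.length - 45 : Nat) : Int) 45).map
          ((fun i => PySem.List.slice h (some i) (some (i + 45))) ∘ (· + 45))
        = (PySem.List.pyRange 0 ((h.length - 45 : Nat) : Int) 45).map
          (fun i => PySem.List.slice (h.drop 45) (some i) (some (i + 45))) := by
      apply List.map_congr_left
      intro x hx
      have hx0 : 0 ≤ x := ((PySem.List.mem_pyRange_iff_of_pos (by norm_num) x).mp hx).1
      obtain ⟨k, rfl⟩ : ∃ k : Nat, x = (k : Int) := ⟨x.toNat, (Int.toNat_of_nonneg hx0).symm⟩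
      simp only [Function.comp_apply]
      have e2 : ((k : Int) + 45 + 45) = (((k + 45 : Nat) : Int) + 45) := by push_cast; ring
      have e1 : ((k : Int) + 45) = ((k + 45 : Nat) : Int) := by push_cast; ring
      rw [e2, e1, hs h (k + 45)]
      rw [← e1, hs (h.drop 45) k, List.drop_drop, Nat.add_comm 45 k]
    rw [hhead, htail]
    have hlen2 : 0 < h.length - 45 := by omega
    obtain ⟨q, rest, hM⟩ : ∃ q rest,
        (PySem.List.pyRange 0 ((h.length - 45 : Nat) : Int) 45).map
          (fun i => PySem.List.slice (h.drop 45) (some i) (some (i + 45))) = q :: rest := by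
      rw [pyRange45_cons _ hlen2, List.map_cons]
      exact ⟨_, _, rfl⟩
    rw [hM, PySem.Chars.join_cons_cons, ← hM]
    have ihh := ih
    rw [show ((h.drop 45).length : Int) = ((h.length - 45 : Nat) : Int) by simp] at ihh
    rw [ihh]
    simp


lemma rstrip_pvW (h : List Char) :
    (∀ c ∈ h, PySem.Chars.isspace c = false) → PySem.Chars.rstrip (pvW h) = pvW h := by
  induction h using pvW.induct with
  | case1 => intro _; simp [pvW, PySem.Chars.rstrip]
  | case2 h hne hle => intro hh; rw [pvW, if_neg hne, if_pos hle]; exact rstrip_noWS h hh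
  | case3 h hne hgt ih =>
    intro hh
    have hdne : h.drop 45 ≠ [] := by
      intro hemp; have := congrArg List.length hemp; simp at this; omega
    have hrec := ih (fun c hc => hh c (List.mem_of_mem_drop hc))
    have hXne : PySem.Chars.rstrip (pvW (h.drop 45)) ≠ [] := by
      rw [hrec]; exact pvW_ne_nil _ hdne
    conv_lhs => rw [pvW, if_neg hne, if_neg hgt]
    rw [← List.singleton_append, ← List.append_assoc, rstrip_append_of_ne _ _ hXne, hrec]
    conv_rhs => rw [pvW, if_neg hne, if_neg hgt]
    simp

-- ===== VERDICT (by name: the statement is the Claim_ definition above) =====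
theorem simulate_encoding_spec : Claim_equal_simulate_encoding := by
  intro pt hdom
  show simulate_encoding pt = simulate_encoding_alt pt
  have hbytes : ∀ b ∈ pt.toList.map Char.toNat, b ≤ 126 := by
    intro b hb
    rw [List.mem_map] at hb
    obtain ⟨c, hc, rfl⟩ := hb
    have hdc := List.all_eq_true.mp hdom c hc
    simp only [pvDomChar, Bool.or_eq_true, Bool.and_eq_true, decide_eq_true_eq, beq_iff_eq] at hdc
    omega
  unfold simulate_encoding simulate_encoding_alt
  apply congrArg String.ofList
  show PySem.Chars.rstrip (pvFin
      ((PySem.List.pyRange 0 ((pt.toList.map Char.toNat).length : Int) 3).foldl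
        (fun st i => pvStep st (PySem.List.slice (pt.toList.map Char.toNat) (some i) (some (i + 3))))
        ([], [])))
    = PySem.Chars.rstrip (PySem.Chars.join ['\n']
      ((PySem.List.pyRange 0 (((pt.toList.map Char.toNat).flatMap pvHexByte).length : Int) 45).map
        (fun i => PySem.List.slice ((pt.toList.map Char.toNat).flatMap pvHexByte) (some i) (some (i + 45)))))
  rw [fold_idx_eq_chunks pvStep (pt.toList.map Char.toNat) ([], [])]
  rw [fold_chunks_wrapA _ [] [] (by norm_num) (chunks_enc_len _)]
  rw [chunks_flat_enc]
  simp only [List.nil_append]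
  have hz : (pt.toList.map Char.toNat).flatMap pvHexByte = [] →
      pvPad (pt.toList.map Char.toNat).length = 0 := by
    intro hnil
    have hlen := pvFlat_len (pt.toList.map Char.toNat)
    rw [hnil] at hlen
    simp only [List.length_nil] at hlen
    simp only [pvPad]
    omega
  rw [rstrip_wrapA _ (pvHex_noWS _ hbytes) _ (by simp only [pvPad]; omega) hz]
  rw [join_windows_eq_pvW, rstrip_pvW _ (pvHex_noWS _ hbytes)]
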